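-- pv_equiv track=rewrite | github.com/maxfu9/euro_website | euro_website/www/store/item.py | _get_highlights
-- ===== SOURCE A (Python) =====
-- def _get_highlights(specs):
--     spec_map = {}
--     for spec in specs or []:
--         label = (spec.get("label") or "").strip().lower()
--         if not label:
--             continue
--         normalized = _normalize_label(label)
--         spec_map[normalized] = spec.get("value") or ""
--
--     def pick(keys, fallback):
--         for key in keys:
--             value = spec_map.get(_normalize_label(key))
--             if value:
--                 return value
--         return fallback
--
--     return [
--         {
--             "label": "Materials",
--             "value": pick(["material", "materials", "plastic type"], "Varies by product"),
--         },
--         {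
--             "label": "Capacity",
--             "value": pick(["capacity", "volume", "size"], "See specifications"),
--         },
--         {
--             "label": "Food-safe",
--             "value": pick(["food safe", "food-safe"], "Available on request"),
--         },
--         {
--             "label": "BPA-free",
--             "value": pick(["bpa free", "bpa-free"], "Available on request"),
--         },
--         {
--             "label": "Dishwasher-safe",
--             "value": pick(["dishwasher safe", "dishwasher-safe"], "Available on request"),
--         },
--     ]
--
-- def _normalize_label(label):
--     return "".join(ch for ch in label.lower() if ch.isalnum())
-- ===== SOURCE B (Python) =====
-- _HIGHLIGHTS = [
--     ("Materials", ("material", "materials", "plastic type"), "Varies by product"),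
--     ("Capacity", ("capacity", "volume", "size"), "See specifications"),
--     ("Food-safe", ("food safe", "food-safe"), "Available on request"),
--     ("BPA-free", ("bpa free", "bpa-free"), "Available on request"),
--     ("Dishwasher-safe", ("dishwasher safe", "dishwasher-safe"), "Available on request"),
-- ]
--
--
-- def _norm(s):
--     return "".join(ch for ch in s.lower() if ch.isalnum())
--
--
-- def _get_highlights(specs):
--     rev = list(reversed(specs or []))
--
--     def pick(keys, fallback):
--         for key in keys:
--             nk = _norm(key)
--             spec = next((s for s in rev if _norm(s.get("label") or "") == nk), None)
--             if spec is not None: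
--                 value = spec.get("value") or ""
--                 if value:
--                     return value
--         return fallback
--
--     return [{"label": lab, "value": pick(keys, fb)} for lab, keys, fb in _HIGHLIGHTS]
-- ===== Notes on version B (the rewrite author's own statement) =====
-- stated objective: alternative
-- what changed: B drops A's spec_map dict entirely: a data-driven table of (label, candidate keys, fallback) drives, per candidate key, a first-match search over the reversed specs list (first match in reverse = A's last-write-wins insertion), instead of A's build-a-normalized-dict-then-lookup.
import Mathlib
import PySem

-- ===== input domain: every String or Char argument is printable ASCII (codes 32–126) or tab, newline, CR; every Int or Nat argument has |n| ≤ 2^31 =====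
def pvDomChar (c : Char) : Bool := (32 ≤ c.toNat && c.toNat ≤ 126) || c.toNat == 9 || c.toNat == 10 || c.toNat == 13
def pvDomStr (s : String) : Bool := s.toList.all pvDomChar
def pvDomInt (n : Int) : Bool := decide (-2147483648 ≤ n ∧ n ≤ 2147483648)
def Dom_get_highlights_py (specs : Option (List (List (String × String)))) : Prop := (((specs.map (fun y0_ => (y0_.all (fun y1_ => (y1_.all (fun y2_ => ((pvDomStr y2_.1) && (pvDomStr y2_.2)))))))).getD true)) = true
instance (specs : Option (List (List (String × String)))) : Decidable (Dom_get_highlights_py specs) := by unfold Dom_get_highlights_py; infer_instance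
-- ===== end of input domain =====

-- B replaces A's spec_map dict with a data-driven highlight table and, per candidate key,
-- a first-match search over the reversed specs list (objective: alternative, same result).

-- ===== PORT A =====

-- _normalize_label(label) = "".join(ch for ch in label.lower() if ch.isalnum())
def normalizeLabelA (label : String) : String :=
  String.ofList ((PySem.Chars.lower label.toList).filter PySem.Chars.isalnum)

-- the spec_map-building loop of A
def buildSpecMapA (specs : List (List (String × String))) : PySem.Dict String String :=
  specs.foldl (fun m spec =>
    let label := PySem.Str.lower (PySem.Str.strip (((PySem.Dict.mk spec).get? "label").getD ""))
    if label = "" then m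
    else m.insert (normalizeLabelA label) (((PySem.Dict.mk spec).get? "value").getD ""))
    PySem.Dict.empty

-- the inner helper pick(keys, fallback)
def pickA (m : PySem.Dict String String) : List String → String → String
  | [], fallback => fallback
  | key :: keys, fallback =>
    match m.get? (normalizeLabelA key) with
    | some value => if value ≠ "" then value else pickA m keys fallback
    | none => pickA m keys fallback

def get_highlights_py (specs : Option (List (List (String × String)))) : List (List (String × String)) :=
  let m := buildSpecMapA (specs.getD [])
  [ [("label", "Materials"), ("value", pickA m ["material", "materials", "plastic type"] "Varies by product")],
    [("label", "Capacity"), ("value", pickA m ["capacity", "volume", "size"] "See specifications")],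
    [("label", "Food-safe"), ("value", pickA m ["food safe", "food-safe"] "Available on request")],
    [("label", "BPA-free"), ("value", pickA m ["bpa free", "bpa-free"] "Available on request")],
    [("label", "Dishwasher-safe"), ("value", pickA m ["dishwasher safe", "dishwasher-safe"] "Available on request")] ]

-- ===== PORT B =====

-- _norm(s) = "".join(ch for ch in s.lower() if ch.isalnum())
def normB (s : String) : String :=
  String.ofList ((PySem.Chars.lower s.toList).filter PySem.Chars.isalnum)

def highlightsTableB : List (String × List String × String) :=
  [ ("Materials", ["material", "materials", "plastic type"], "Varies by product"),
    ("Capacity", ["capacity", "volume", "size"], "See specifications"),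
    ("Food-safe", ["food safe", "food-safe"], "Available on request"),
    ("BPA-free", ["bpa free", "bpa-free"], "Available on request"),
    ("Dishwasher-safe", ["dishwasher safe", "dishwasher-safe"], "Available on request") ]

-- pick(keys, fallback): per key, first spec of the reversed list whose normalized label matches
def pickB (rev : List (List (String × String))) : List String → String → String
  | [], fallback => fallback
  | key :: keys, fallback =>
    match rev.find? (fun spec => normB (((PySem.Dict.mk spec).get? "label").getD "") == normB key) with
    | some spec =>
      let value := ((PySem.Dict.mk spec).get? "value").getD ""
      if value ≠ "" then value else pickB rev keys fallback
    | none => pickB rev keys fallback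

def get_highlights_py_alt (specs : Option (List (List (String × String)))) : List (List (String × String)) :=
  let rev := (specs.getD []).reverse
  highlightsTableB.map (fun h => [("label", h.1), ("value", pickB rev h.2.1 h.2.2)])

-- ===== PRECONDITION & SPEC =====
def Spec_get_highlights_py (specs : Option (List (List (String × String)))) (out : List (List (String × String))) : Prop := out = get_highlights_py_alt specs
instance (specs : Option (List (List (String × String)))) (out : List (List (String × String))) : Decidable (Spec_get_highlights_py specs out) := by unfold Spec_get_highlights_py; infer_instance

-- ===== CLAIM (what is proved, stated in full; the proofs are below) =====
def Claim_equal_get_highlights_py : Prop := ∀ (specs : Option (List (List (String × String)))), Dom_get_highlights_py specs → Spec_get_highlights_py specs (get_highlights_py specs)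

-- ===== LEMMAS AND PROOFS =====

theorem char_toNat_ofNat {n : Nat} (h : n < 55296) : (Char.ofNat n).toNat = n := by
  unfold Char.ofNat Char.toNat
  have hv : n.isValidChar := Or.inl h
  simp [hv]

theorem lowerChar_of_isspace {c : Char} (h : PySem.Chars.isspace c = true) :
    PySem.Chars.lowerChar c = c := by
  simp only [PySem.Chars.isspace, Bool.or_eq_true, Bool.and_eq_true, decide_eq_true_eq] at h
  simp only [PySem.Chars.lowerChar, PySem.Chars.isupper, Bool.and_eq_true, decide_eq_true_eq,
    Char.le_def] at *
  split_ifs with hu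
  · exfalso; obtain ⟨h1, h2⟩ := hu
    change (65 : Nat) ≤ c.toNat at h1; change c.toNat ≤ 90 at h2
    omega
  · rfl

theorem isalnum_false_of_isspace {c : Char} (h : PySem.Chars.isspace c = true) :
    PySem.Chars.isalnum c = false := by
  simp only [PySem.Chars.isspace, Bool.or_eq_true, Bool.and_eq_true, decide_eq_true_eq] at h
  simp only [PySem.Chars.isalnum, PySem.Chars.isalpha, PySem.Chars.isdigit, PySem.Chars.isupper,
    PySem.Chars.islower, Bool.or_eq_false_iff, Bool.and_eq_false_iff, decide_eq_false_iff_not,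
    Char.le_def, UInt32.le_iff_toNat_le, show ('A'.val.toNat) = 65 from rfl,
    show ('Z'.val.toNat) = 90 from rfl, show ('a'.val.toNat) = 97 from rfl,
    show ('z'.val.toNat) = 122 from rfl, show ('0'.val.toNat) = 48 from rfl,
    show ('9'.val.toNat) = 57 from rfl]
  have hcc : c.val.toNat = c.toNat := rfl
  omega

theorem lowerChar_lowerChar (c : Char) :
    PySem.Chars.lowerChar (PySem.Chars.lowerChar c) = PySem.Chars.lowerChar c := by
  unfold PySem.Chars.lowerChar PySem.Chars.isupper
  split_ifs with h1 h2
  · exfalso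
    simp only [Bool.and_eq_true, decide_eq_true_eq, Char.le_def, UInt32.le_iff_toNat_le,
      show ('A'.val.toNat) = 65 from rfl, show ('Z'.val.toNat) = 90 from rfl] at h1 h2
    have hcc : c.toNat = c.val.toNat := rfl
    have h1' : 65 ≤ c.val.toNat ∧ c.val.toNat ≤ 90 := h1
    have e : (Char.ofNat (c.toNat + 32)).toNat = c.toNat + 32 := char_toNat_ofNat (by omega)
    have h2' : 65 ≤ (Char.ofNat (c.toNat + 32)).val.toNat ∧ (Char.ofNat (c.toNat + 32)).val.toNat ≤ 90 := h2
    have e2 : (Char.ofNat (c.toNat + 32)).val.toNat = c.toNat + 32 := e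
    omega
  · rfl
  · rfl

-- dropping a whitespace prefix does not change the alnum residue of the lowered string
theorem filter_lower_dropWhile (l : List Char) :
    ((l.dropWhile PySem.Chars.isspace).map PySem.Chars.lowerChar).filter PySem.Chars.isalnum
      = (l.map PySem.Chars.lowerChar).filter PySem.Chars.isalnum := by
  induction l with
  | nil => rfl
  | cons a t ih =>
    by_cases h : PySem.Chars.isspace a = true
    · rw [List.dropWhile_cons_of_pos h, ih, List.map_cons, List.filter_cons,
        lowerChar_of_isspace h, isalnum_false_of_isspace h]
      simp
    · rw [List.dropWhile_cons_of_neg h]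

-- stripping does not change the alnum residue of the lowered string
theorem filter_lower_strip (l : List Char) :
    (PySem.Chars.lower (PySem.Chars.strip l)).filter PySem.Chars.isalnum
      = (PySem.Chars.lower l).filter PySem.Chars.isalnum := by
  unfold PySem.Chars.strip PySem.Chars.rstrip PySem.Chars.lstrip PySem.Chars.lower
  rw [List.map_reverse, List.filter_reverse, filter_lower_dropWhile, ← List.filter_reverse,
    ← List.map_reverse, List.reverse_reverse, filter_lower_dropWhile]

theorem lower_lower (l : List Char) :
    PySem.Chars.lower (PySem.Chars.lower l) = PySem.Chars.lower l := by
  unfold PySem.Chars.lower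
  rw [List.map_map]
  exact List.map_congr_left (fun c _ => lowerChar_lowerChar c)

-- A's normalization of the stripped+lowered label is B's normalization of the raw label
theorem normalizeLabelA_strip_lower (s : String) :
    normalizeLabelA (PySem.Str.lower (PySem.Str.strip s)) = normB s := by
  unfold normalizeLabelA normB
  rw [PySem.Str.toList_lower, PySem.Str.toList_strip, lower_lower, filter_lower_strip]

theorem normB_of_strip_lower_empty {s : String}
    (h : PySem.Str.lower (PySem.Str.strip s) = "") : normB s = "" := by
  have h' : PySem.Chars.lower (PySem.Chars.strip s.toList) = [] := by
    have := congrArg String.toList h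
    simpa [PySem.Str.toList_lower, PySem.Str.toList_strip] using this
  unfold normB
  rw [← filter_lower_strip, ← lower_lower (PySem.Chars.strip s.toList), h']
  rfl

-- dict built by a conditional-insert loop, looked up at nk, equals the first match of the reversed list
theorem foldl_if_insert_get? {α : Type} (c : α → Bool) (k : α → String) (v : α → String)
    (nk : String) : ∀ (l : List α) (d : PySem.Dict String String),
    (l.foldl (fun m a => if c a then m.insert (k a) (v a) else m) d).get? nk
      = match l.reverse.find? (fun a => c a && (k a == nk)) with
        | some a => some (v a)
        | none => d.get? nk := by
  intro l
  induction l with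
  | nil => intro d; rfl
  | cons a t ih =>
    intro d
    simp only [List.foldl_cons, List.reverse_cons, List.find?_append]
    rw [ih]
    cases hf : t.reverse.find? (fun a => c a && (k a == nk)) with
    | some b => simp
    | none =>
      simp only [Option.none_or]
      by_cases hc : c a = true
      · by_cases hk : k a = nk
        · simp only [List.find?_cons, hc, hk, beq_self_eq_true, Bool.and_true, if_pos]
          subst hk
          simp [PySem.Dict.get?_insert_self]
        · have hb : (k a == nk) = false := by simp [hk]
          simp [hc, hb, PySem.Dict.get?_insert_of_ne _ _ (Ne.symm hk)]
      · simp only [Bool.not_eq_true] at hc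
        simp [hc]

-- the specialized form: A's spec_map lookup = B's reverse find, for any non-empty normalized key
theorem specMap_get?_eq_find (l : List (List (String × String))) (nk : String) (hnk : nk ≠ "") :
    (buildSpecMapA l).get? nk
      = (l.reverse.find? (fun spec =>
          normB (((PySem.Dict.mk spec).get? "label").getD "") == nk)).map
          (fun spec => ((PySem.Dict.mk spec).get? "value").getD "") := by
  have hstep : (fun (m : PySem.Dict String String) (spec : List (String × String)) =>
      let label := PySem.Str.lower (PySem.Str.strip (((PySem.Dict.mk spec).get? "label").getD ""))
      if label = "" then m
      else m.insert (normalizeLabelA label) (((PySem.Dict.mk spec).get? "value").getD ""))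
    = (fun m spec =>
      if !decide (PySem.Str.lower (PySem.Str.strip (((PySem.Dict.mk spec).get? "label").getD "")) = "")
      then m.insert (normalizeLabelA (PySem.Str.lower (PySem.Str.strip (((PySem.Dict.mk spec).get? "label").getD ""))))
             (((PySem.Dict.mk spec).get? "value").getD "")
      else m) := by
    funext m spec
    by_cases h : PySem.Str.lower (PySem.Str.strip (((PySem.Dict.mk spec).get? "label").getD "")) = "" <;>
      simp [h]
  unfold buildSpecMapA
  rw [hstep, foldl_if_insert_get?]
  have hpred : (fun (spec : List (String × String)) =>
      !decide (PySem.Str.lower (PySem.Str.strip (((PySem.Dict.mk spec).get? "label").getD "")) = "")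
        && (normalizeLabelA (PySem.Str.lower (PySem.Str.strip (((PySem.Dict.mk spec).get? "label").getD ""))) == nk))
      = (fun spec => normB (((PySem.Dict.mk spec).get? "label").getD "") == nk) := by
    funext spec
    by_cases h : PySem.Str.lower (PySem.Str.strip (((PySem.Dict.mk spec).get? "label").getD "")) = ""
    · have h2 : normB (((PySem.Dict.mk spec).get? "label").getD "") = "" := normB_of_strip_lower_empty h
      simp [h, h2, Ne.symm hnk]
    · simp [h, normalizeLabelA_strip_lower]
  rw [hpred]
  cases (l.reverse.find? (fun spec => normB (((PySem.Dict.mk spec).get? "label").getD "") == nk)) with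
  | some s => rfl
  | none => rfl

theorem pickA_eq_pickB (l : List (List (String × String))) (keys : List String)
    (fallback : String) (hk : ∀ key ∈ keys, normB key ≠ "") :
    pickA (buildSpecMapA l) keys fallback = pickB l.reverse keys fallback := by
  induction keys with
  | nil => rfl
  | cons key keys ih =>
    have hnk : normB key ≠ "" := hk key (by simp)
    have hA : normalizeLabelA key = normB key := rfl
    unfold pickA pickB
    rw [hA, specMap_get?_eq_find l (normB key) hnk]
    cases (l.reverse.find? (fun spec =>
        normB (((PySem.Dict.mk spec).get? "label").getD "") == normB key)) with
    | some spec =>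
      simp only [Option.map_some]
      split_ifs with h
      · rfl
      · exact ih (fun k hkm => hk k (by simp [hkm]))
    | none =>
      simp only [Option.map_none]
      exact ih (fun k hkm => hk k (by simp [hkm]))

-- ===== VERDICT (by name: the statement is the Claim_ definition above) =====
theorem get_highlights_py_spec : Claim_equal_get_highlights_py := by
  intro specs _
  show get_highlights_py specs = get_highlights_py_alt specs
  simp only [get_highlights_py, get_highlights_py_alt, highlightsTableB, List.map]
  rw [pickA_eq_pickB _ _ _ (by decide), pickA_eq_pickB _ _ _ (by decide),
    pickA_eq_pickB _ _ _ (by decide), pickA_eq_pickB _ _ _ (by decide),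
    pickA_eq_pickB _ _ _ (by decide)]
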